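-- pv_equiv track=rewrite | github.com/pokerdio/generic | e/e-75.py | subcount
-- ===== SOURCE A (Python) =====
-- def subcount(v):
--     """returns an interator to v sized lists of positive numbers each
--     smaller or equal to the one in v in the same position    """
--     ret = [0] * len(v)
--
--     p = 1
--     for i in v:
--         p *= i + 1
--
--     yield ret[:]
--     for _ in range(p - 1):
--         ret[0] += 1
--         for i in range(len(v)):
--             if ret[i] > v[i]:
--                 ret[i] = 0
--                 ret[i + 1] += 1
--             else:
--                 break
--         yield ret[:]
-- ===== SOURCE B (Python) =====
-- def subcount(v):
--     p = 1
--     for x in v: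
--         p *= x + 1
--     yield [0] * len(v)
--     for k in range(1, p):
--         digits = []
--         for x in v:
--             digits.append(k % (x + 1))
--             k //= x + 1
--         yield digits
-- ===== Notes on version B (the rewrite author's own statement) =====
-- stated objective: alternative
-- what changed: B replaces A's shared mutable odometer (increment ret[0], then an index carry loop) by stateless mixed-radix decoding: each yielded list is rebuilt independently from its rank k with k % (v[i]+1) and k //= (v[i]+1).
-- outside the precondition, e.g. on subcount([-3, -3]): A raises IndexError, B returns [[0, 0], [-1, -1], [0, -1], [-1, 0]]
import Mathlib
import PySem

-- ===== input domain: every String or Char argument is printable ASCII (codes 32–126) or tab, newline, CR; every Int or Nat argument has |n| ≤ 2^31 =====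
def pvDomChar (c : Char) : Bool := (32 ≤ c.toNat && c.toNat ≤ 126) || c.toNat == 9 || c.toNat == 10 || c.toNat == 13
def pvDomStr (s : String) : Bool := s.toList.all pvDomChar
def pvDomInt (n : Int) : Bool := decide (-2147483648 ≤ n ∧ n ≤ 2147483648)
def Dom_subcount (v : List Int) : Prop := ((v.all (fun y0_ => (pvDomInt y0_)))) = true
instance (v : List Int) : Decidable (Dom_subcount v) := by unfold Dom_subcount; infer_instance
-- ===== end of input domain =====

-- B changes the algorithm (stateless mixed-radix decoding of each rank k instead of A's
-- mutable odometer with a carry loop); equivalence is about the yielded sequence, listed.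

-- ===== PORT A =====
-- inner carry loop: `for i in range(len(v)): if ret[i] > v[i]: ret[i] = 0; ret[i+1] += 1 else: break`
-- (the write `ret[i+1] += 1` raises IndexError in Python when i+1 = len(ret); such inputs are
-- excluded by Pre_subcount, and List.set/getD are silent no-ops there)
def pvCarryA (v : List Int) (ret : List Int) (i : Nat) : List Int :=
  if _h : i < v.length then
    if ret.getD i 0 > v.getD i 0 then
      pvCarryA v ((ret.set i 0).set (i + 1) (((ret.set i 0).getD (i + 1) 0) + 1)) (i + 1)
    else ret
  else ret
termination_by v.length - i

-- one pass of A's outer loop body: `ret[0] += 1`, the carry loop, then `yield ret[:]`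
def pvStepA (v : List Int) (st : List Int × List (List Int)) : List Int × List (List Int) :=
  let r := pvCarryA v (st.1.set 0 (st.1.getD 0 0 + 1)) 0
  (r, st.2 ++ [r])

def subcount (v : List Int) : List (List Int) :=
  let ret0 : List Int := List.replicate v.length 0
  let p : Int := v.foldl (fun p i => p * (i + 1)) 1
  (((PySem.List.pyRange 0 (p - 1) 1).foldl (fun st _ => pvStepA v st) (ret0, [ret0]))).2

-- ===== PORT B =====
-- the digits loop: `for x in v: digits.append(k % (x+1)); k //= x+1`
def pvDecodeB (k : Int) : List Int → List Int
  | [] => []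
  | x :: xs => PySem.Int.mod k (x + 1) :: pvDecodeB (PySem.Int.floordiv k (x + 1)) xs

def subcount_alt (v : List Int) : List (List Int) :=
  let p : Int := v.foldl (fun p x => p * (x + 1)) 1
  List.replicate v.length 0 :: (PySem.List.pyRange 1 p 1).map (fun k => pvDecodeB k v)

-- ===== PRECONDITION & SPEC =====
-- Pre_ excludes lists with a negative entry whose product ∏(v[i]+1) exceeds 1: there A's carry
-- loop (comparing against negative bounds) either raises IndexError or yields an order that is
-- an accident of the odometer, while B's mod/div by negative radices does its own (different)
-- accidental thing; the docstring's domain is nonnegative entries.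
def Pre_subcount (v : List Int) : Prop :=
  (∀ x ∈ v, 0 ≤ x) ∨ v.foldl (fun p x => p * (x + 1)) 1 ≤ 1
instance (v : List Int) : Decidable (Pre_subcount v) := by unfold Pre_subcount; infer_instance

def pvWitness_subcount : List Int := [1, 2]

def Spec_subcount (v : List Int) (out : List (List Int)) : Prop := out = subcount_alt v
instance (v : List Int) (out : List (List Int)) : Decidable (Spec_subcount v out) := by unfold Spec_subcount; infer_instance

-- ===== CLAIM (what is proved, stated in full; the proofs are below) =====
def Claim_equal_subcount : Prop := ∀ (v : List Int), Dom_subcount v → Pre_subcount v → Spec_subcount v (subcount v)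

-- ===== LEMMAS AND PROOFS =====

-- structural view of A's carry loop
def pvIncHead : List Int → List Int
  | [] => []
  | r :: rs => (r + 1) :: rs

def pvChk : List Int → List Int → List Int
  | [], ret => ret
  | _ :: _, [] => []
  | x :: xs, r :: rs => if r > x then 0 :: pvChk xs (pvIncHead rs) else r :: rs

def pvProd (v : List Int) : Int := (v.map (· + 1)).prod

theorem pvProd_cons (x : Int) (xs : List Int) : pvProd (x :: xs) = (x + 1) * pvProd xs := by
  simp [pvProd]

theorem pvFold_prod (v : List Int) : ∀ a : Int, v.foldl (fun p x => p * (x + 1)) a = a * pvProd v := by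
  induction v with
  | nil => intro a; simp [pvProd]
  | cons x xs ih => intro a; simp [List.foldl, ih, pvProd_cons]; ring

theorem pvProd_pos (v : List Int) (h : ∀ x ∈ v, 0 ≤ x) : 0 < pvProd v := by
  induction v with
  | nil => simp [pvProd]
  | cons x xs ih =>
    rw [pvProd_cons]
    have hx : 0 ≤ x := h x (by simp)
    have := ih (fun y hy => h y (by simp [hy]))
    positivity

theorem pvIncHead_eq_set (r : List Int) : r.set 0 (r.getD 0 0 + 1) = pvIncHead r := by
  cases r <;> simp [pvIncHead]

theorem pvIncHead_length (r : List Int) : (pvIncHead r).length = r.length := by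
  cases r <;> simp [pvIncHead]

theorem pvCarry_split (v2 : List Int) : ∀ (v1 r1 r2 : List Int),
    r1.length = v1.length → r2.length = v2.length →
    pvCarryA (v1 ++ v2) (r1 ++ r2) v1.length = r1 ++ pvChk v2 r2 := by
  induction v2 with
  | nil =>
    intro v1 r1 r2 h1 h2
    have : r2 = [] := List.eq_nil_of_length_eq_zero (by simpa using h2)
    subst this
    rw [pvCarryA]
    simp [pvChk]
  | cons x xs ih =>
    intro v1 r1 r2 h1 h2
    cases r2 with
    | nil => simp at h2
    | cons r rs =>
      rw [pvCarryA]
      have hlt : v1.length < (v1 ++ x :: xs).length := by simp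
      have hgr : (r1 ++ r :: rs).getD v1.length 0 = r := by
        rw [← h1]; simp [List.getD_eq_getElem?_getD]
      have hgv : (v1 ++ x :: xs).getD v1.length 0 = x := by
        simp [List.getD_eq_getElem?_getD]
      rw [dif_pos hlt, hgr, hgv]
      by_cases hc : r > x
      · rw [if_pos hc]
        have hset1 : (r1 ++ r :: rs).set v1.length 0 = (r1 ++ [0]) ++ rs := by
          rw [← h1, List.set_append_right _ _ (le_refl _)]
          simp
        have hget2 : ((r1 ++ [0]) ++ rs).getD (v1.length + 1) 0 = rs.getD 0 0 := by
          have : (r1 ++ [0]).length = v1.length + 1 := by simp [h1]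
          rw [List.append_assoc, ← h1]
          simp [List.getD_eq_getElem?_getD, List.getElem?_append_right]
        have hset2 : ((r1 ++ [0]) ++ rs).set (v1.length + 1) (rs.getD 0 0 + 1)
            = (r1 ++ [0]) ++ pvIncHead rs := by
          rw [List.set_append_right _ _ (by simp [h1])]
          have hidx : v1.length + 1 - (r1 ++ [0]).length = 0 := by simp [h1]
          rw [hidx, pvIncHead_eq_set]
        rw [hset1, hget2, hset2]
        have hv1 : v1.length + 1 = (v1 ++ [x]).length := by simp
        have hvs : v1 ++ x :: xs = (v1 ++ [x]) ++ xs := by simp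
        have h2' : rs.length = xs.length := by simpa using h2
        rw [hvs, hv1, ih (v1 ++ [x]) (r1 ++ [0]) (pvIncHead rs)
              (by simp [h1]) (by rw [pvIncHead_length]; exact h2')]
        simp [pvChk, hc]
      · rw [if_neg hc]
        simp [pvChk, hc]

theorem pvDecodeB_length (k : Int) (v : List Int) : (pvDecodeB k v).length = v.length := by
  induction v generalizing k with
  | nil => simp [pvDecodeB]
  | cons x xs ih => simp [pvDecodeB, ih]

theorem pvDecodeB_zero (v : List Int) (h : ∀ x ∈ v, 0 ≤ x) :
    pvDecodeB 0 v = List.replicate v.length 0 := by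
  induction v with
  | nil => simp [pvDecodeB]
  | cons x xs ih =>
    have hx : 0 ≤ x := h x (by simp)
    have hb : (0:Int) < x + 1 := by omega
    rw [pvDecodeB, PySem.Int.mod_eq_emod_of_pos hb, PySem.Int.floordiv_eq_ediv_of_pos hb]
    simp [List.replicate_succ, ih (fun y hy => h y (by simp [hy]))]

theorem pvChk_decode (v : List Int) : ∀ t : Int, (∀ x ∈ v, 0 ≤ x) → 0 ≤ t → t + 1 < pvProd v →
    pvChk v (pvIncHead (pvDecodeB t v)) = pvDecodeB (t + 1) v := by
  induction v with
  | nil =>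
    intro t _ ht hlt
    simp [pvProd] at hlt
    omega
  | cons x xs ih =>
    intro t hnn ht hlt
    have hx : 0 ≤ x := hnn x (by simp)
    have hb : (0:Int) < x + 1 := by omega
    have hbne : (x + 1 : Int) ≠ 0 := by omega
    rw [pvDecodeB, PySem.Int.mod_eq_emod_of_pos hb, PySem.Int.floordiv_eq_ediv_of_pos hb]
    set b := x + 1 with hbdef
    set m := t % b with hm
    set q := t / b with hq
    have hm0 : 0 ≤ m := Int.emod_nonneg t hbne
    have hmb : m < b := Int.emod_lt_of_pos t hb
    have htqm : b * q + m = t := Int.mul_ediv_add_emod t b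
    rw [pvIncHead, pvChk]
    by_cases hc : m + 1 > x
    · -- carry: m = x, so t + 1 = b * (q + 1)
      have hmx : m = x := by omega
      have hbq : b * (q + 1) = b * q + b := by ring
      have ht1 : t + 1 = b * (q + 1) := by omega
      rw [if_pos hc]
      have hq0 : 0 ≤ q := Int.ediv_nonneg ht (le_of_lt hb)
      have hq1 : q + 1 < pvProd xs := by
        rw [pvProd_cons] at hlt
        rw [ht1] at hlt
        exact lt_of_mul_lt_mul_left hlt (le_of_lt hb)
      rw [ih q (fun y hy => hnn y (by simp [hy])) hq0 hq1]
      rw [pvDecodeB, PySem.Int.mod_eq_emod_of_pos hb, PySem.Int.floordiv_eq_ediv_of_pos hb]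
      rw [ht1, Int.mul_emod_right, Int.mul_ediv_cancel_left _ hbne]
    · -- no carry: (t+1) % b = m + 1, (t+1) / b = q
      rw [if_neg hc]
      have ht1 : t + 1 = (m + 1) + b * q := by omega
      have hemod : (t + 1) % b = m + 1 := by
        rw [ht1, Int.add_mul_emod_self_left, Int.emod_eq_of_lt (by omega) (by omega)]
      have hediv : (t + 1) / b = q := by
        rw [ht1, Int.add_mul_ediv_left _ _ hbne, Int.ediv_eq_zero_of_lt (by omega) (by omega)]
        omega
      rw [pvDecodeB, PySem.Int.mod_eq_emod_of_pos hb, PySem.Int.floordiv_eq_ediv_of_pos hb]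
      rw [hemod, hediv]

-- A's per-iteration step equals decoding the next rank
theorem pvStep_decode (v : List Int) (t : Int) (hnn : ∀ x ∈ v, 0 ≤ x) (ht : 0 ≤ t)
    (hlt : t + 1 < pvProd v) :
    pvCarryA v ((pvDecodeB t v).set 0 ((pvDecodeB t v).getD 0 0 + 1)) 0
      = pvDecodeB (t + 1) v := by
  rw [pvIncHead_eq_set]
  have := pvCarry_split v [] [] (pvIncHead (pvDecodeB t v))
    (by simp) (by rw [pvIncHead_length, pvDecodeB_length])
  simpa [pvChk_decode v t hnn ht hlt] using this

-- fold with a body ignoring the element = function iteration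
theorem pvFold_ignore {α β : Type} (g : α → α) (l : List β) : ∀ (st : α),
    l.foldl (fun s _ => g s) st = g^[l.length] st := by
  induction l with
  | nil => intro st; simp
  | cons b bs ih =>
    intro st
    simp only [List.foldl, List.length_cons, Function.iterate_succ, Function.comp_apply]
    exact ih (g st)

-- the odometer invariant: after n steps, state = decode n, accumulator = decodes of 0..n
theorem pvIter_inv (v : List Int) (hnn : ∀ x ∈ v, 0 ≤ x) :
    ∀ n : Nat, (n : Int) ≤ pvProd v - 1 →
    (pvStepA v)^[n] (pvDecodeB 0 v, [pvDecodeB 0 v])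
      = (pvDecodeB (n : Int) v, (List.range (n + 1)).map (fun t : Nat => pvDecodeB (t : Int) v)) := by
  intro n
  induction n with
  | zero => intro _; simp
  | succ n ih =>
    intro hle
    have hn : (n : Int) ≤ pvProd v - 1 := by push_cast at hle ⊢; omega
    rw [Function.iterate_succ_apply', ih hn]
    have hstep : pvCarryA v ((pvDecodeB (n:Int) v).set 0 ((pvDecodeB (n:Int) v).getD 0 0 + 1)) 0
        = pvDecodeB ((n:Int) + 1) v :=
      pvStep_decode v n hnn (by positivity) (by push_cast at hle ⊢; omega)
    rw [Prod.mk.injEq]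
    unfold pvStepA
    simp only [hstep]
    refine ⟨by push_cast; ring_nf, ?_⟩
    simp [List.range_succ]

-- ===== VERDICT (by name: the statement is the Claim_ definition above) =====
theorem subcount_spec : Claim_equal_subcount := by
  intro v _ hpre
  unfold Spec_subcount subcount subcount_alt
  simp only []
  rcases hpre with hnn | hp1
  · -- nonnegative entries: both enumerate all p mixed-radix tuples
    have hp : v.foldl (fun p x => p * (x + 1)) 1 = pvProd v := by
      rw [pvFold_prod]; ring
    have hpos : 0 < pvProd v := pvProd_pos v hnn
    rw [hp]
    have hrep : List.replicate v.length (0:Int) = pvDecodeB 0 v := (pvDecodeB_zero v hnn).symm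
    rw [hrep, pvFold_ignore, PySem.List.length_pyRange_one]
    have h00 : pvProd v - 1 - 0 = pvProd v - 1 := by ring
    rw [h00]
    have hNle : (((pvProd v - 1).toNat : Nat) : Int) ≤ pvProd v - 1 := by omega
    rw [pvIter_inv v hnn _ hNle]
    simp only []
    rw [PySem.List.pyRange_one 1 (pvProd v), List.range_succ_eq_map, List.map_cons,
        List.map_map, List.map_map]
    refine congrArg₂ List.cons (by norm_num) ?_
    apply List.map_congr_left
    intro k _
    simp only [Function.comp_apply]
    congr 1
    push_cast
    ring
  · -- product ≤ 1: both ranges are empty, only the initial all-zero list is produced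
    have hp : v.foldl (fun p x => p * (x + 1)) 1 ≤ 1 := hp1
    rw [PySem.List.pyRange_one_eq_nil (by omega), PySem.List.pyRange_one_eq_nil (by omega)]
    simp
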